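-- pv_equiv track=rewrite | github.com/nirvan840/CAPTCHA_Precog-IITH | task1_classification/dataset.py | _classes_per_length
-- ===== SOURCE A (Python) =====
-- import itertools
-- from typing import Iterable, List, Sequence, Tuple
--
-- LENGTHS: Sequence[int] = range(3, 7)  # 3 … 6 => 4 variants
--
-- IMAGES_PER_CLASS = 50 # 5
--
-- def _classes_per_length(images_per_length: int) -> dict[int, int]:
--     base = images_per_length // IMAGES_PER_CLASS
--     rem  = images_per_length % IMAGES_PER_CLASS
--     mapping = {l: base for l in LENGTHS}
--     if rem > 0 and len(LENGTHS) > 0: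
--         for l in itertools.islice(itertools.cycle(LENGTHS), rem):
--             mapping[l] += 1
--     return mapping
-- ===== SOURCE B (Python) =====
-- from typing import Sequence
--
-- LENGTHS: Sequence[int] = range(3, 7)  # 3 … 6 => 4 variants
--
-- IMAGES_PER_CLASS = 50
--
-- def _classes_per_length(images_per_length: int) -> dict[int, int]:
--     base, rem = divmod(images_per_length, IMAGES_PER_CLASS)
--     q, r = divmod(rem, len(LENGTHS))
--     return {l: base + q + (1 if i < r else 0) for i, l in enumerate(LENGTHS)}
-- ===== Notes on version B (the rewrite author's own statement) =====
-- stated objective: simpler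
-- what changed: Replaced the itertools.cycle/islice round-robin increment loop over the dict with a closed-form divmod of the remainder by the number of lengths: the length at index i gets base + q plus one extra iff i < r, built in one comprehension.
import Mathlib
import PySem

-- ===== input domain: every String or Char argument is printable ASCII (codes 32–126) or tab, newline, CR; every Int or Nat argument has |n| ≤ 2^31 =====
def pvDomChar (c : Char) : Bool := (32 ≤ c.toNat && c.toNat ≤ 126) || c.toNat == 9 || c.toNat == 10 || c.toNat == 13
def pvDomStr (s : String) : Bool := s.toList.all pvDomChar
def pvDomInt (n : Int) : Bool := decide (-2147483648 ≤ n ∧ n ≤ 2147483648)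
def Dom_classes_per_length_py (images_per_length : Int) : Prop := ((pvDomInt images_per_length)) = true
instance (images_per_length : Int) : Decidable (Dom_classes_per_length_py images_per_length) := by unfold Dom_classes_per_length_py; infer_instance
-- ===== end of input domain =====

-- B replaces A's itertools.cycle/islice round-robin increment loop with a closed-form
-- divmod distribution (simpler); the dict (association list) return value is identical.

-- ===== PORT A =====
-- LENGTHS = range(3, 7)
def pyLENGTHS : List Int := [3, 4, 5, 6]

def classes_per_length_py (images_per_length : Int) : List (Int × Int) :=
  let base := PySem.Int.floordiv images_per_length 50
  let rem := PySem.Int.mod images_per_length 50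
  -- mapping = {l: base for l in LENGTHS}
  let mapping : PySem.Dict Int Int :=
    pyLENGTHS.foldl (fun d l => d.insert l base) PySem.Dict.empty
  -- if rem > 0 and len(LENGTHS) > 0: for l in islice(cycle(LENGTHS), rem): mapping[l] += 1
  -- islice(cycle(LENGTHS), rem) is the list of LENGTHS[i % len(LENGTHS)] for i < rem;
  -- mapping[l] += 1 is exact as modify with default 0 since every l is already a key.
  let mapping :=
    if rem > 0 ∧ pyLENGTHS.length > 0 then
      ((List.range rem.toNat).map
          (fun i => pyLENGTHS.getD (i % pyLENGTHS.length) 0)).foldl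
        (fun d l => d.modify l 0 (· + 1)) mapping
    else mapping
  mapping.items

-- ===== PORT B =====
def classes_per_length_py_alt (images_per_length : Int) : List (Int × Int) :=
  -- base, rem = divmod(images_per_length, 50); q, r = divmod(rem, len(LENGTHS))
  let base := PySem.Int.floordiv images_per_length 50
  let rem := PySem.Int.mod images_per_length 50
  let q := PySem.Int.floordiv rem 4
  let r := PySem.Int.mod rem 4
  -- {l: base + q + (1 if i < r else 0) for i, l in enumerate(LENGTHS)}
  (PySem.List.enumerate pyLENGTHS).map
    (fun p => (p.2, base + q + if (p.1 : Int) < r then 1 else 0))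

-- ===== PRECONDITION & SPEC =====
def Spec_classes_per_length_py (images_per_length : Int) (out : List (Int × Int)) : Prop := out = classes_per_length_py_alt images_per_length
instance (images_per_length : Int) (out : List (Int × Int)) : Decidable (Spec_classes_per_length_py images_per_length out) := by unfold Spec_classes_per_length_py; infer_instance

-- ===== CLAIM (what is proved, stated in full; the proofs are below) =====
def Claim_equal_classes_per_length_py : Prop := ∀ (images_per_length : Int), Dom_classes_per_length_py images_per_length → Spec_classes_per_length_py images_per_length (classes_per_length_py images_per_length)

-- ===== LEMMAS AND PROOFS =====

-- ===== VERDICT (by name: the statement is the Claim_ definition above) =====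
set_option maxHeartbeats 4000000 in
theorem classes_per_length_py_spec : Claim_equal_classes_per_length_py := by
  intro ipl _
  unfold Spec_classes_per_length_py classes_per_length_py classes_per_length_py_alt
  have h0 : 0 ≤ PySem.Int.mod ipl 50 := PySem.Int.mod_nonneg ipl (by norm_num)
  have h1 : PySem.Int.mod ipl 50 < 50 := PySem.Int.mod_lt ipl (by norm_num)
  obtain ⟨k, hk, hmod⟩ : ∃ k : Nat, k < 50 ∧ PySem.Int.mod ipl 50 = (k : Int) :=
    ⟨(PySem.Int.mod ipl 50).toNat, by omega, by omega⟩
  simp only [hmod]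
  generalize PySem.Int.floordiv ipl 50 = b
  interval_cases k <;>
    simp [pyLENGTHS, PySem.Dict.modify, PySem.Dict.insert, PySem.Dict.empty,
      PySem.List.enumerate, PySem.Int.floordiv, PySem.Int.mod, List.range, List.range.loop,
      PySem.Dict.contains, PySem.Dict.getD, PySem.Dict.get?] <;> ring
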